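-- pv_equiv track=rewrite | github.com/hpicrypto/mppj-artifacts | mppj-exps/gen_data.py | join_tables
-- ===== SOURCE A (Python) =====
-- def join_tables(dicts):
--     """Join all tables on common keys."""
--     if not dicts:
--         return {}
--
--     # Find keys that exist in all dictionaries
--     common_keys = set(dicts[0].keys())
--     for d in dicts[1:]:
--         common_keys &= set(d.keys())
--
--     # Build joined table
--     joined = {}
--     for key in common_keys:
--         values = [d[key] for d in dicts]
--         joined[key] = values
--
--     return joined
-- ===== SOURCE B (Python) =====
-- def join_tables(dicts):
--     """Join all tables on common keys."""
--     if not dicts: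
--         return {}
--     joined = {k: [v] for k, v in dicts[0].items()}
--     for d in dicts[1:]:
--         joined = {k: vs + [d[k]] for k, vs in joined.items() if k in d}
--     return joined
-- ===== Notes on version B (the rewrite author's own statement) =====
-- stated objective: alternative
-- what changed: Replaces A's two-phase plan (materialise the common-key set by repeated set intersection, then a second loop gathering each key's values across all dicts) with an incremental binary join: seed an accumulator from the first dict's items and fold every further dict into it, dropping keys it lacks and appending its value, so no common-key set and no per-key scan over all dicts ever exists.
import Mathlib
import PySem

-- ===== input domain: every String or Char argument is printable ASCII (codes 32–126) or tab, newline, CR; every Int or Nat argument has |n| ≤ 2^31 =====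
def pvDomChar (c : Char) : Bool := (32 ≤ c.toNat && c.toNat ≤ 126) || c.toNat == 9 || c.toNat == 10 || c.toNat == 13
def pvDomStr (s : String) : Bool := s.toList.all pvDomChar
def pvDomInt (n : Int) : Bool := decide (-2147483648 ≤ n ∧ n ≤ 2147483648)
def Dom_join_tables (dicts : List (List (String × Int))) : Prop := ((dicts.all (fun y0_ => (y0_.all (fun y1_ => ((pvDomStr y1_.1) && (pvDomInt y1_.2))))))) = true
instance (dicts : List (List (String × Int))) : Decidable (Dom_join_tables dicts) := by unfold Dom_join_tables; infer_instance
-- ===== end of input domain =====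

-- B replaces A's two phases (intersect all key sets, then gather values) by an incremental
-- binary join that folds each further dict into an accumulator seeded from the first dict;
-- equal outputs (dicts compare as key→value maps; both ports list keys in first-dict order,
-- which Python's set iteration does not pin down).

-- ===== PORT A =====
-- dicts are association lists (lookup = first match); d[key] (only reached for keys present
-- in every dict) is ported as getD with default 0, exact wherever Python's lookup does not raise.
def join_tables (dicts : List (List (String × Int))) : List (String × List Int) :=
  match dicts with
  | [] => []
  | d0 :: rest =>
    let common : PySem.Set String :=
      rest.foldl
        (fun s d => PySem.Set.inter s (PySem.Set.ofList (PySem.Dict.keys (PySem.Dict.mk d))))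
        (PySem.Set.ofList (PySem.Dict.keys (PySem.Dict.mk d0)))
    let joined : PySem.Dict String (List Int) :=
      common.foldl
        (fun j k => j.insert k ((d0 :: rest).map (fun d => PySem.Dict.getD (PySem.Dict.mk d) k 0)))
        PySem.Dict.empty
    joined.items

-- ===== PORT B =====
-- iterating `dicts[0].items()` is ported as the represented dict's items under the
-- first-match convention: the distinct keys in order, each with its first value.
def join_tables_alt (dicts : List (List (String × Int))) : List (String × List Int) :=
  match dicts with
  | [] => []
  | d0 :: rest =>
    let joined0 : PySem.Dict String (List Int) :=
      PySem.Dict.mk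
        ((PySem.Set.ofList (PySem.Dict.keys (PySem.Dict.mk d0))).map
          (fun k => (k, [PySem.Dict.getD (PySem.Dict.mk d0) k 0])))
    let joined : PySem.Dict String (List Int) :=
      rest.foldl
        (fun j d =>
          PySem.Dict.mk
            ((j.items.filter (fun kv => PySem.Dict.contains (PySem.Dict.mk d) kv.1)).map
              (fun kv => (kv.1, kv.2 ++ [PySem.Dict.getD (PySem.Dict.mk d) kv.1 0]))))
        joined0
    joined.items

-- ===== PRECONDITION & SPEC =====
def Spec_join_tables (dicts : List (List (String × Int))) (out : List (String × List Int)) : Prop := out = join_tables_alt dicts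
instance (dicts : List (List (String × Int))) (out : List (String × List Int)) : Decidable (Spec_join_tables dicts out) := by unfold Spec_join_tables; infer_instance

-- ===== CLAIM (what is proved, stated in full; the proofs are below) =====
def Claim_equal_join_tables : Prop := ∀ (dicts : List (List (String × Int))), Dom_join_tables dicts → Spec_join_tables dicts (join_tables dicts)

-- ===== LEMMAS AND PROOFS =====

-- membership in the set of a dict's keys is the dict's contains test
theorem contains_ofList_keys (d : List (String × Int)) (k : String) :
    PySem.Set.contains (PySem.Set.ofList (PySem.Dict.keys (PySem.Dict.mk d))) k
      = PySem.Dict.contains (PySem.Dict.mk d) k := by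
  rw [Bool.eq_iff_iff]
  simp [PySem.Set.mem_ofList]

-- A's intersection loop is a single filter by "key present in every remaining dict"
theorem inter_foldl (rest : List (List (String × Int))) (s : List String) :
    rest.foldl
      (fun s d => PySem.Set.inter s (PySem.Set.ofList (PySem.Dict.keys (PySem.Dict.mk d)))) s
    = s.filter (fun k => rest.all (fun d => PySem.Dict.contains (PySem.Dict.mk d) k)) := by
  induction rest generalizing s with
  | nil => simp
  | cons d rest ih =>
    rw [List.foldl_cons, ih, PySem.Set.inter, List.filter_filter]
    congr 1
    funext k
    rw [contains_ofList_keys, List.all_cons, Bool.and_comm]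

theorem keys_mk_map (s : List String) (v : String → List Int) :
    PySem.Dict.keys (PySem.Dict.mk (s.map (fun k => (k, v k)))) = s := by
  simp only [PySem.Dict.keys, List.map_map, Function.comp_def]
  simp

-- A's insert loop over a nodup key list, characterised via Set.update
theorem insert_fold (v : String → List Int) (p : String → Bool) (l : List String) :
    ∀ (s : List String), s.Nodup →
    (l.foldl
        (fun (j : PySem.Dict String (List Int)) k => if p k then j.insert k (v k) else j)
        (PySem.Dict.mk (s.map (fun k => (k, v k))))).items
      = (PySem.Set.update s (l.filter p)).map (fun k => (k, v k)) := by
  induction l with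
  | nil => intro s _; simp [PySem.Set.update]
  | cons k l ih =>
    intro s hs
    by_cases hp : p k
    · have hstep : (PySem.Dict.mk (s.map (fun k => (k, v k)))).insert k (v k)
          = PySem.Dict.mk ((PySem.Set.add s k).map (fun k => (k, v k))) := by
        by_cases hk : k ∈ s
        · have hc : (PySem.Dict.mk (s.map (fun k => (k, v k)))).contains k = true := by
            rw [PySem.Dict.contains_eq_decide_mem_keys, keys_mk_map]
            simp [hk]
          rw [PySem.Set.add_of_mem hk]
          simp only [PySem.Dict.insert, hc, if_true, List.map_map]
          congr 1
          apply List.map_congr_left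
          intro x _
          by_cases hx : x = k
          · simp [Function.comp, hx]
          · simp [Function.comp, hx]
        · have hc : (PySem.Dict.mk (s.map (fun k => (k, v k)))).contains k = false := by
            rw [PySem.Dict.contains_eq_decide_mem_keys, keys_mk_map]
            simp [hk]
          rw [PySem.Set.add_of_not_mem hk]
          simp [PySem.Dict.insert, hc]
      rw [List.foldl_cons, List.filter_cons_of_pos hp, if_pos hp, hstep,
          ih (PySem.Set.add s k) (PySem.Set.nodup_add s k hs)]
      rfl
    · rw [List.foldl_cons, List.filter_cons_of_neg (by simp [hp]), if_neg hp]
      exact ih s hs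

theorem update_of_disjoint (l : List String) :
    ∀ (s : List String), (∀ x ∈ l, x ∉ s) → l.Nodup → PySem.Set.update s l = s ++ l := by
  induction l with
  | nil => intro s _ _; simp [PySem.Set.update]
  | cons x l ih =>
    intro s hdisj hnd
    have hx : x ∉ s := hdisj x (by simp)
    have h1 : PySem.Set.update s (x :: l) = PySem.Set.update (s ++ [x]) l := by
      simp [PySem.Set.update, PySem.Set.add_of_not_mem hx]
    rw [h1, ih (s ++ [x])]
    · simp
    · intro y hy
      simp only [List.mem_append, List.mem_singleton]
      rintro (h | rfl)
      · exact hdisj y (by simp [hy]) h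
      · exact (List.nodup_cons.mp hnd).1 hy
    · exact (List.nodup_cons.mp hnd).2

-- A's result: the filtered deduplicated first-dict key list, paired with the value gatherer
theorem A_items (rest : List (List (String × Int))) (K0 : List String)
    (v : String → List Int) :
    ((rest.foldl
        (fun s d => PySem.Set.inter s (PySem.Set.ofList (PySem.Dict.keys (PySem.Dict.mk d))))
        (PySem.Set.ofList K0)).foldl
      (fun (j : PySem.Dict String (List Int)) k => j.insert k (v k)) PySem.Dict.empty).items
      = ((PySem.Set.ofList K0).filter
          (fun k => rest.all (fun d => PySem.Dict.contains (PySem.Dict.mk d) k))).map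
          (fun k => (k, v k)) := by
  set p : String → Bool :=
    fun k => rest.all (fun d => PySem.Dict.contains (PySem.Dict.mk d) k) with hp
  have hA :
      (rest.foldl
        (fun s d => PySem.Set.inter s (PySem.Set.ofList (PySem.Dict.keys (PySem.Dict.mk d))))
        (PySem.Set.ofList K0)).foldl
          (fun (j : PySem.Dict String (List Int)) k => j.insert k (v k)) PySem.Dict.empty
      = ((PySem.Set.ofList K0).filter p).foldl
          (fun (j : PySem.Dict String (List Int)) k => if p k then j.insert k (v k) else j)
          PySem.Dict.empty := by
    rw [inter_foldl]
    apply List.foldl_ext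
    intro j k hk
    rw [if_pos (List.mem_filter.mp hk).2]
  rw [hA]
  have hitems := insert_fold v p ((PySem.Set.ofList K0).filter p) ([] : List String) List.nodup_nil
  rw [show (PySem.Dict.mk (([] : List String).map (fun k => (k, v k))))
        = (PySem.Dict.empty : PySem.Dict String (List Int)) from rfl] at hitems
  rw [hitems]
  have hL : ((PySem.Set.ofList K0).filter p).filter p = (PySem.Set.ofList K0).filter p := by
    rw [List.filter_filter]; simp
  rw [hL]
  have hnod : ((PySem.Set.ofList K0).filter p).Nodup := (PySem.Set.nodup_ofList K0).filter p
  rw [show PySem.Set.update ([] : List String) ((PySem.Set.ofList K0).filter p)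
        = (PySem.Set.ofList K0).filter p by
      simpa using update_of_disjoint ((PySem.Set.ofList K0).filter p) [] (by simp) hnod]

-- B's fold, characterised for any seed dict written as a mapped key list
theorem B_fold (rest : List (List (String × Int))) :
    ∀ (S : List String) (f : String → List Int),
    (rest.foldl
        (fun (j : PySem.Dict String (List Int)) d =>
          PySem.Dict.mk
            ((j.items.filter (fun kv => PySem.Dict.contains (PySem.Dict.mk d) kv.1)).map
              (fun kv => (kv.1, kv.2 ++ [PySem.Dict.getD (PySem.Dict.mk d) kv.1 0]))))
        (PySem.Dict.mk (S.map (fun k => (k, f k))))).items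
      = (S.filter (fun k => rest.all (fun d => PySem.Dict.contains (PySem.Dict.mk d) k))).map
          (fun k => (k, f k ++ rest.map (fun d => PySem.Dict.getD (PySem.Dict.mk d) k 0))) := by
  induction rest with
  | nil => intro S f; simp
  | cons d rest ih =>
    intro S f
    rw [List.foldl_cons]
    have hstep :
        PySem.Dict.mk
            (((PySem.Dict.mk (S.map (fun k => (k, f k)))).items.filter
                (fun kv => PySem.Dict.contains (PySem.Dict.mk d) kv.1)).map
              (fun kv => (kv.1, kv.2 ++ [PySem.Dict.getD (PySem.Dict.mk d) kv.1 0])))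
          = PySem.Dict.mk
              ((S.filter (fun k => PySem.Dict.contains (PySem.Dict.mk d) k)).map
                (fun k => (k, f k ++ [PySem.Dict.getD (PySem.Dict.mk d) k 0]))) := by
      congr 1
      rw [show (PySem.Dict.mk (S.map (fun k => (k, f k)))).items = S.map (fun k => (k, f k)) from rfl]
      rw [List.filter_map, List.map_map]
      rfl
    rw [hstep, ih]
    rw [List.filter_filter]
    have hpred : (fun a => ((rest.all fun d => PySem.Dict.contains (PySem.Dict.mk d) a)
          && PySem.Dict.contains (PySem.Dict.mk d) a))
        = (fun k => (d :: rest).all fun d' => PySem.Dict.contains (PySem.Dict.mk d') k) := by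
      funext k; rw [List.all_cons, Bool.and_comm]
    rw [hpred]
    apply List.map_congr_left
    intro k _
    simp [List.append_assoc]

-- ===== VERDICT (by name: the statement is the Claim_ definition above) =====
theorem join_tables_spec : Claim_equal_join_tables := by
  intro dicts _
  cases dicts with
  | nil => rfl
  | cons d0 rest =>
    show join_tables (d0 :: rest) = join_tables_alt (d0 :: rest)
    have hB : join_tables_alt (d0 :: rest)
        = ((PySem.Set.ofList (PySem.Dict.keys (PySem.Dict.mk d0))).filter
            (fun k => rest.all (fun d => PySem.Dict.contains (PySem.Dict.mk d) k))).map
            (fun k => (k, [PySem.Dict.getD (PySem.Dict.mk d0) k 0]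
              ++ rest.map (fun d => PySem.Dict.getD (PySem.Dict.mk d) k 0))) :=
      B_fold rest (PySem.Set.ofList (PySem.Dict.keys (PySem.Dict.mk d0)))
        (fun k => [PySem.Dict.getD (PySem.Dict.mk d0) k 0])
    have hA : join_tables (d0 :: rest)
        = ((PySem.Set.ofList (PySem.Dict.keys (PySem.Dict.mk d0))).filter
            (fun k => rest.all (fun d => PySem.Dict.contains (PySem.Dict.mk d) k))).map
            (fun k => (k, (d0 :: rest).map (fun d => PySem.Dict.getD (PySem.Dict.mk d) k 0))) :=
      A_items rest (PySem.Dict.keys (PySem.Dict.mk d0))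
        (fun k => (d0 :: rest).map (fun d => PySem.Dict.getD (PySem.Dict.mk d) k 0))
    rw [hA, hB]
    simp
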